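-- pv_equiv track=rewrite | github.com/aaravsinhaofficial/MapShift | mapshift/envs/procthor/generator.py | _farthest_rooms
-- ===== SOURCE A (Python) =====
-- def _farthest_rooms(rooms: tuple[str, ...], connectivity: dict[str, tuple[str, ...]]) -> tuple[str, str]:
--     def room_distance(start_room: str, goal_room: str) -> int:
--         frontier = [(start_room, 0)]
--         seen = {start_room}
--         for room_id, distance in frontier:
--             if room_id == goal_room:
--                 return distance
--             for neighbor in connectivity.get(room_id, ()):
--                 if neighbor not in seen:
--                     seen.add(neighbor)
--                     frontier.append((neighbor, distance + 1))
--         return 0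
--
--     best_pair = (rooms[0], rooms[-1])
--     best_distance = -1
--     for left in rooms:
--         for right in rooms:
--             if left == right:
--                 continue
--             distance = room_distance(left, right)
--             if distance > best_distance:
--                 best_pair = (left, right)
--                 best_distance = distance
--     return best_pair
-- ===== SOURCE B (Python) =====
-- def _farthest_rooms(rooms, connectivity):
--     # Two-list BFS per source building a full distance map once, then one
--     # first-max scan over the flattened pair list (instead of a fresh
--     # goal-stopping BFS for every ordered pair).
--     def distances_from(start):
--         dist = {}
--         seen = {start}
--         current, nxt = [start], []
--         d = 0
--         while current or nxt:
--             if not current: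
--                 current, nxt = nxt, []
--                 d += 1
--             room = current.pop(0)
--             dist[room] = d
--             for n in connectivity.get(room, ()):
--                 if n not in seen:
--                     seen.add(n)
--                     nxt.append(n)
--         return dist
--
--     maps = {room: distances_from(room) for room in rooms}
--     pairs = [(l, r) for l in rooms for r in rooms if l != r]
--     if not pairs:
--         return (rooms[0], rooms[-1])
--     return max(pairs, key=lambda p: maps[p[0]].get(p[1], 0))
-- ===== Notes on version B (the rewrite author's own statement) =====
-- stated objective: alternative
-- what changed: B replaces A's goal-stopping BFS per ordered pair by one two-list (current/next level) BFS per source room that records a full distance map, and replaces A's nested best-so-far loops by a single first-max scan over the flattened list of unequal pairs; intended as faster (O(V*(V+E)+V^2) vs O(V^2*(V+E))), but a timing run measured only 1.28x at the largest size both finished, so no speed is claimed.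
import Mathlib
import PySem

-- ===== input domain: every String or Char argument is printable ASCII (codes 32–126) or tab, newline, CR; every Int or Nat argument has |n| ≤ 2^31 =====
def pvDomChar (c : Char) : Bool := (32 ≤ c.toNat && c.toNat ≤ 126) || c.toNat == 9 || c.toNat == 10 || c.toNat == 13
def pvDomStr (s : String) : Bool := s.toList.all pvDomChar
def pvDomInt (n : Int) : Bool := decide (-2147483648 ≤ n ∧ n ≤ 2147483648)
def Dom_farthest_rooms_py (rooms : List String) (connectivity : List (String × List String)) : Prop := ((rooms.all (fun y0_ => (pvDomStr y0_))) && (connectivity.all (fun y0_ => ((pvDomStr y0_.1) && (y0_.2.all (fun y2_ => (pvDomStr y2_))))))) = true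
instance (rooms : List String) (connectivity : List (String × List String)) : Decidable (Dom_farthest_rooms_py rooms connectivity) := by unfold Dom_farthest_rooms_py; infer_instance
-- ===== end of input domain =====

-- B replaces A's goal-stopping BFS per ordered pair by one two-list (current/next
-- level) BFS per source room recording a full distance map, and A's nested
-- best-so-far loops by a first-max scan over the flattened pair list (objective: alternative).

-- ===== PORT A =====

-- connectivity.get(room, ()) on the association list: first match, default []
def pvNbrs (connectivity : List (String × List String)) (room : String) : List String :=
  ((connectivity.find? (fun p => p.1 == room)).map Prod.snd).getD []

-- A's inner neighbor loop: for each neighbor not in seen, add it to seen and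
-- append (neighbor, distance+1) to the frontier
def pvExpand (connectivity : List (String × List String)) (room : String) (distance : Int)
    (seen : PySem.Set String) : PySem.Set String × List (String × Int) :=
  (pvNbrs connectivity room).foldl
    (fun st n =>
      if PySem.Set.contains st.1 n then st
      else (PySem.Set.add st.1 n, st.2 ++ [(n, distance + 1)]))
    (seen, [])

-- fuel bound: the Python frontier loop makes at most 1 + (total neighbors) iterations
def pvFuel (connectivity : List (String × List String)) : Nat :=
  1 + (connectivity.map (fun p => p.2.length)).sum

-- A's room_distance: BFS that returns the distance at which the goal is first
-- reached, 0 if the frontier is exhausted (fuel only makes the loop total)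
def pvBfsA (connectivity : List (String × List String)) (goal : String) :
    Nat → List (String × Int) → PySem.Set String → Int
  | _, [], _ => 0
  | 0, _ :: _, _ => 0
  | fuel + 1, (room, d) :: rest, seen =>
    if room == goal then d
    else
      let st := pvExpand connectivity room d seen
      pvBfsA connectivity goal fuel (rest ++ st.2) st.1

def pvRoomDistance (connectivity : List (String × List String)) (start goal : String) : Int :=
  pvBfsA connectivity goal (pvFuel connectivity) [(start, 0)] (PySem.Set.ofList [start])

def farthest_rooms_py (rooms : List String) (connectivity : List (String × List String)) : String × String :=
  match PySem.List.pyGet? rooms 0, PySem.List.pyGet? rooms (-1) with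
  | some r0, some rl =>
    (rooms.foldl (fun st left =>
        rooms.foldl (fun (st : (String × String) × Int) right =>
            if left == right then st
            else
              let d := pvRoomDistance connectivity left right
              if d > st.2 then ((left, right), d) else st)
          st)
      ((r0, rl), -1)).1
  | _, _ => ("", "")  -- unreachable under Pre_: rooms[0] raises IndexError

-- ===== PORT B =====

-- connectivity.get(room, ()) through the dict view of the association list
def pvConn (connectivity : List (String × List String)) (room : String) : List String :=
  (PySem.Dict.mk connectivity).getD room []

-- fuel bound for B's while loop: one iteration per processed room, at most
-- 1 + (total neighbors) rooms are ever discovered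
def pvFuelB (connectivity : List (String × List String)) : Nat :=
  1 + (connectivity.map (fun p => p.2.length)).sum

-- B's while loop: `current` is the rest of this level (distance d), `nxt` the
-- next level; when `current` runs out it swaps in `nxt` and bumps d; each
-- iteration pops one room, records its distance, and appends unseen neighbors
def pvBfsL (connectivity : List (String × List String)) :
    Nat → List String → List String → PySem.Set String → Int → PySem.Dict String Int →
    PySem.Dict String Int
  | _, [], [], _, _, dist => dist
  | 0, _, _, _, _, dist => dist
  | fuel + 1, [], n :: ns, seen, d, dist =>
    -- `if not current: current, nxt = nxt, []; d += 1` then pop n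
    let st := (pvConn connectivity n).foldl
      (fun st m => if PySem.Set.contains st.1 m then st
                   else (PySem.Set.add st.1 m, st.2 ++ [m]))
      (seen, ([] : List String))
    pvBfsL connectivity fuel ns st.2 st.1 (d + 1) (dist.insert n (d + 1))
  | fuel + 1, room :: cur, next, seen, d, dist =>
    let st := (pvConn connectivity room).foldl
      (fun st m => if PySem.Set.contains st.1 m then st
                   else (PySem.Set.add st.1 m, st.2 ++ [m]))
      (seen, next)
    pvBfsL connectivity fuel cur st.2 st.1 d (dist.insert room d)

def pvDistMap (connectivity : List (String × List String)) (start : String) :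
    PySem.Dict String Int :=
  pvBfsL connectivity (pvFuelB connectivity) [start] [] (PySem.Set.ofList [start]) 0
    PySem.Dict.empty

def farthest_rooms_py_alt (rooms : List String) (connectivity : List (String × List String)) : String × String :=
  let maps := rooms.foldl (fun m room => m.insert room (pvDistMap connectivity room))
    (PySem.Dict.empty : PySem.Dict String (PySem.Dict String Int))
  let pairs := rooms.flatMap (fun l => (rooms.filter (fun r => !(l == r))).map (fun r => (l, r)))
  match (PySem.List.pyGet? rooms 0).bind
      (fun r0 => (PySem.List.pyGet? rooms (-1)).map (fun rl => (r0, rl))) with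
  | some (r0, rl) =>
    -- max(pairs, key=…) when pairs ≠ [] ; `if not pairs` branch is max? = none.
    -- maps[p[0]] cannot raise KeyError (p.1 ∈ rooms), so getD's default is never used.
    match PySem.List.max? pairs (fun p => (maps.getD p.1 PySem.Dict.empty).getD p.2 0) with
    | some p => p
    | none => (r0, rl)
  | none => ("", "")  -- unreachable under Pre_: rooms[0] raises IndexError

-- ===== PRECONDITION & SPEC =====
-- On rooms = [] the Python raises IndexError at rooms[0]; everything else is accepted.
def Pre_farthest_rooms_py (rooms : List String) (connectivity : List (String × List String)) : Prop :=
  rooms ≠ []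
instance (rooms : List String) (connectivity : List (String × List String)) : Decidable (Pre_farthest_rooms_py rooms connectivity) := by unfold Pre_farthest_rooms_py; infer_instance
def pvWitness_farthest_rooms_py : List String × (List (String × List String)) :=
  (["a", "b"], [("a", ["b"])])
def Spec_farthest_rooms_py (rooms : List String) (connectivity : List (String × List String)) (out : String × String) : Prop := out = farthest_rooms_py_alt rooms connectivity
instance (rooms : List String) (connectivity : List (String × List String)) (out : String × String) : Decidable (Spec_farthest_rooms_py rooms connectivity out) := by unfold Spec_farthest_rooms_py; infer_instance

-- ===== CLAIM (what is proved, stated in full; the proofs are below) =====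
def Claim_equal_farthest_rooms_py : Prop := ∀ (rooms : List String) (connectivity : List (String × List String)), Dom_farthest_rooms_py rooms connectivity → Pre_farthest_rooms_py rooms connectivity → Spec_farthest_rooms_py rooms connectivity (farthest_rooms_py rooms connectivity)

-- ===== LEMMAS AND PROOFS =====

-- B's neighbor lookup agrees with A's
lemma pvConn_get? (connectivity : List (String × List String)) (room : String) :
    (PySem.Dict.mk connectivity).get? room
      = (connectivity.find? (fun p => p.1 == room)).map Prod.snd := by
  induction connectivity with
  | nil => rfl
  | cons hd tl ih =>
    obtain ⟨k, v⟩ := hd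
    rw [PySem.Dict.get?_mk_cons]
    by_cases h : (k == room) = true
    · simp [h]
    · simp only [List.find?_cons, h, if_false, Bool.false_eq_true]
      exact ih

lemma pvConn_eq (connectivity : List (String × List String)) (room : String) :
    pvConn connectivity room = pvNbrs connectivity room := by
  unfold pvConn pvNbrs
  cases h : (connectivity.find? (fun p => p.1 == room)) with
  | none =>
    rw [PySem.Dict.getD_of_get?_eq_none]
    · simp
    · rw [pvConn_get?, h]; rfl
  | some p =>
    rw [PySem.Dict.getD_of_get?_eq_some (v := p.2)]
    · simp
    · rw [pvConn_get?, h]; rfl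

-- the one-room neighbor fold of B, started on an empty accumulator
def pvGrow (connectivity : List (String × List String)) (room : String)
    (seen : PySem.Set String) : PySem.Set String × List String :=
  (pvNbrs connectivity room).foldl
    (fun st m => if PySem.Set.contains st.1 m then st
                 else (PySem.Set.add st.1 m, st.2 ++ [m]))
    (seen, [])

-- the accumulator only ever grows at the end: shift it out of the fold
lemma pvGrow_shift (ns : List String) :
    ∀ (s : PySem.Set String) (acc : List String),
      ns.foldl (fun st m => if PySem.Set.contains st.1 m then st
                            else (PySem.Set.add st.1 m, st.2 ++ [m])) (s, acc)
      = ((ns.foldl (fun st m => if PySem.Set.contains st.1 m then st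
                            else (PySem.Set.add st.1 m, st.2 ++ [m])) (s, [])).1,
         acc ++ (ns.foldl (fun st m => if PySem.Set.contains st.1 m then st
                            else (PySem.Set.add st.1 m, st.2 ++ [m])) (s, [])).2) := by
  induction ns with
  | nil => intro s acc; simp
  | cons n ns ih =>
    intro s acc
    simp only [List.foldl_cons]
    by_cases h : PySem.Set.contains s n = true
    · simp only [h, if_true]
      exact ih s acc
    · simp only [h, if_false, Bool.false_eq_true]
      simp only [List.nil_append]
      rw [ih (PySem.Set.add s n) (acc ++ [n]), ih (PySem.Set.add s n) [n]]
      simp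

-- A's pair-building neighbor fold is B's fold with distances attached
lemma pvExpand_eq_grow (connectivity : List (String × List String)) (room : String)
    (distance : Int) (seen : PySem.Set String) :
    pvExpand connectivity room distance seen
      = ((pvGrow connectivity room seen).1,
         (pvGrow connectivity room seen).2.map (fun n => (n, distance + 1))) := by
  unfold pvExpand pvGrow
  suffices h : ∀ (ns : List String) (s : PySem.Set String) (accS : List String),
      ns.foldl (fun st n => if PySem.Set.contains st.1 n then st
                  else (PySem.Set.add st.1 n, st.2 ++ [(n, distance + 1)]))
        (s, accS.map (fun n => (n, distance + 1)))
      = ((ns.foldl (fun st m => if PySem.Set.contains st.1 m then st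
                  else (PySem.Set.add st.1 m, st.2 ++ [m])) (s, accS)).1,
         (ns.foldl (fun st m => if PySem.Set.contains st.1 m then st
                  else (PySem.Set.add st.1 m, st.2 ++ [m])) (s, accS)).2.map
           (fun n => (n, distance + 1))) by
    have := h (pvNbrs connectivity room) seen []
    simpa using this
  intro ns
  induction ns with
  | nil => intro s accS; rfl
  | cons n ns ih =>
    intro s accS
    simp only [List.foldl_cons]
    by_cases h : PySem.Set.contains s n = true
    · simp only [h, if_true]; exact ih s accS
    · simp only [h, if_false, Bool.false_eq_true]
      have := ih (PySem.Set.add s n) (accS ++ [n])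
      simpa using this

-- invariants of one growth step
lemma pvGrow_spec (connectivity : List (String × List String)) (room : String)
    (seen : PySem.Set String) :
    (∀ x ∈ seen, x ∈ (pvGrow connectivity room seen).1) ∧
    (∀ x ∈ (pvGrow connectivity room seen).2,
        x ∈ (pvGrow connectivity room seen).1 ∧ x ∉ seen) ∧
    (pvGrow connectivity room seen).2.Nodup := by
  unfold pvGrow
  suffices h : ∀ (ns : List String) (s : PySem.Set String) (acc : List String),
      (∀ x ∈ seen, x ∈ s) → (∀ x ∈ acc, x ∈ s ∧ x ∉ seen) → acc.Nodup →
      (∀ x ∈ seen, x ∈ (ns.foldl (fun st m => if PySem.Set.contains st.1 m then st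
          else (PySem.Set.add st.1 m, st.2 ++ [m])) (s, acc)).1) ∧
      (∀ x ∈ (ns.foldl (fun st m => if PySem.Set.contains st.1 m then st
          else (PySem.Set.add st.1 m, st.2 ++ [m])) (s, acc)).2,
          x ∈ (ns.foldl (fun st m => if PySem.Set.contains st.1 m then st
          else (PySem.Set.add st.1 m, st.2 ++ [m])) (s, acc)).1 ∧ x ∉ seen) ∧
      (ns.foldl (fun st m => if PySem.Set.contains st.1 m then st
          else (PySem.Set.add st.1 m, st.2 ++ [m])) (s, acc)).2.Nodup by
    exact h (pvNbrs connectivity room) seen [] (fun x hx => hx) (by simp) (by simp)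
  intro ns
  induction ns with
  | nil => intro s acc h1 h2 h3; exact ⟨h1, h2, h3⟩
  | cons n ns ih =>
    intro s acc h1 h2 h3
    simp only [List.foldl_cons]
    by_cases hc : PySem.Set.contains s n = true
    · simp only [hc, if_true]; exact ih s acc h1 h2 h3
    · have hns : n ∉ s := fun hmem => hc ((PySem.Set.contains_iff s n).mpr hmem)
      simp only [hc, if_false, Bool.false_eq_true]
      apply ih
      · intro x hx
        simp only [PySem.Set.mem_add]
        exact Or.inl (h1 x hx)
      · intro x hx
        rcases List.mem_append.mp hx with hx | hx
        · exact ⟨by simp only [PySem.Set.mem_add]; exact Or.inl (h2 x hx).1, (h2 x hx).2⟩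
        · have : x = n := by simpa using hx
          subst this
          exact ⟨by simp [PySem.Set.mem_add], fun hn => hns (h1 _ hn)⟩
      · refine List.Nodup.append h3 (List.nodup_singleton _) ?_
        intro a ha hb
        have hb' : a = n := by simpa using hb
        subst hb'
        exact hns (h2 a ha).1

-- once the goal is recorded and can never be processed again, its entry persists
lemma pvBfsL_persist (connectivity : List (String × List String)) (goal : String) (v : Int) :
    ∀ (fuel : Nat) (cur next : List String) (seen : PySem.Set String) (d : Int)
      (dist : PySem.Dict String Int),
      dist.get? goal = some v → goal ∉ cur → goal ∉ next → goal ∈ seen →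
      (pvBfsL connectivity fuel cur next seen d dist).get? goal = some v := by
  intro fuel
  induction fuel with
  | zero =>
    intro cur next seen d dist h _ _ _
    cases cur <;> cases next <;> simpa [pvBfsL] using h
  | succ f ih =>
    intro cur next seen d dist h hcur hnext hseen
    have hg1 := fun room => (pvGrow_spec connectivity room seen).1
    have hg2 := fun room => (pvGrow_spec connectivity room seen).2.1
    cases cur with
    | nil =>
      cases next with
      | nil => simpa [pvBfsL] using h
      | cons n ns =>
        have hgn : goal ≠ n := fun hgn => hnext (hgn ▸ List.mem_cons_self ..)
        simp only [pvBfsL, pvConn_eq, show ∀ c r s, (pvNbrs c r).foldl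
          (fun st m => if PySem.Set.contains st.1 m then st
            else (PySem.Set.add st.1 m, st.2 ++ [m])) (s, ([] : List String)) = pvGrow c r s
          from fun _ _ _ => rfl]
        apply ih
        · rw [PySem.Dict.get?_insert_of_ne _ _ hgn]; exact h
        · exact fun hg => hnext (List.mem_cons_of_mem _ hg)
        · exact fun hg => ((hg2 n) goal hg).2 hseen
        · exact (hg1 n) goal hseen
    | cons room cur' =>
      have hgr : goal ≠ room := fun hgr => hcur (hgr ▸ List.mem_cons_self ..)
      simp only [pvBfsL, pvConn_eq]
      rw [pvGrow_shift]
      apply ih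
      · rw [PySem.Dict.get?_insert_of_ne _ _ hgr]; exact h
      · exact fun hg => hcur (List.mem_cons_of_mem _ hg)
      · intro hg
        rcases List.mem_append.mp hg with hg | hg
        · exact hnext hg
        · exact ((hg2 room) goal hg).2 hseen
      · exact (hg1 room) goal hseen

-- the heart: A's goal-stopping queue BFS equals a lookup in B's level map,
-- under the alignment pending = current@d ++ next@(d+1)
lemma pvBfsAL (connectivity : List (String × List String)) (goal : String) :
    ∀ (fuel : Nat) (cur next : List String) (seen : PySem.Set String) (d : Int)
      (dist : PySem.Dict String Int),
      dist.get? goal = none → (∀ x, x ∈ cur ∨ x ∈ next → x ∈ seen) →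
      (cur ++ next).Nodup →
      pvBfsA connectivity goal fuel
          (cur.map (fun x => (x, d)) ++ next.map (fun x => (x, d + 1))) seen
        = (pvBfsL connectivity fuel cur next seen d dist).getD goal 0 := by
  intro fuel
  induction fuel with
  | zero =>
    intro cur next seen d dist h _ _
    cases cur <;> cases next <;>
      simp [pvBfsA, pvBfsL, PySem.Dict.getD_of_get?_eq_none _ _ h]
  | succ f ih =>
    intro cur next seen d dist h hsub hnd
    -- processing one room at distance d2 whose remaining level is cur2 and
    -- whose (partial) next level is nx
    have hstep : ∀ (room : String) (cur2 nx : List String) (d2 : Int)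
        (dist0 : PySem.Dict String Int),
        dist0.get? goal = none → room ∈ seen →
        (∀ x, x ∈ cur2 ∨ x ∈ nx → x ∈ seen) → (room :: (cur2 ++ nx)).Nodup →
        pvBfsA connectivity goal (f + 1)
            ((room, d2) :: (cur2.map (fun x => (x, d2)) ++ nx.map (fun x => (x, d2 + 1)))) seen
          = (pvBfsL connectivity f cur2 (nx ++ (pvGrow connectivity room seen).2)
              (pvGrow connectivity room seen).1 d2 (dist0.insert room d2)).getD goal 0 := by
      intro room cur2 nx d2 dist0 h0 hroom hsub2 hnd2
      obtain ⟨hg1, hg2, hg3⟩ := pvGrow_spec connectivity room seen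
      have hnd2' := List.nodup_cons.mp hnd2
      by_cases hg : (room == goal) = true
      · have hrg : room = goal := eq_of_beq hg
        simp only [pvBfsA, hg, if_true]
        have hpersist := pvBfsL_persist connectivity goal d2 f cur2
          (nx ++ (pvGrow connectivity room seen).2) (pvGrow connectivity room seen).1 d2
          (dist0.insert room d2)
          (by rw [hrg] at *; exact PySem.Dict.get?_insert_self _ _ _)
          (fun hgc => hnd2'.1 (hrg ▸ List.mem_append_left _ hgc))
          (by
            intro hgn
            rcases List.mem_append.mp hgn with hgn | hgn
            · exact hnd2'.1 (hrg ▸ List.mem_append_right _ hgn)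
            · exact (hg2 goal hgn).2 (hrg ▸ hroom))
          (hg1 goal (hrg ▸ hroom))
        rw [PySem.Dict.getD_of_get?_eq_some _ _ hpersist]
      · have hgr : goal ≠ room := fun hh => hg (beq_iff_eq.mpr hh.symm)
        simp only [pvBfsA, hg, if_false, Bool.false_eq_true]
        rw [pvExpand_eq_grow]
        have hpend : (cur2.map (fun x => (x, d2)) ++ nx.map (fun x => (x, d2 + 1)))
            ++ (pvGrow connectivity room seen).2.map (fun n => (n, d2 + 1))
            = cur2.map (fun x => (x, d2))
              ++ (nx ++ (pvGrow connectivity room seen).2).map (fun x => (x, d2 + 1)) := by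
          simp [List.map_append]
        rw [hpend]
        apply ih
        · rw [PySem.Dict.get?_insert_of_ne _ _ hgr]; exact h0
        · intro x hx
          rcases hx with hx | hx
          · exact hg1 x (hsub2 x (Or.inl hx))
          · rcases List.mem_append.mp hx with hx | hx
            · exact hg1 x (hsub2 x (Or.inr hx))
            · exact (hg2 x hx).1
        · rw [← List.append_assoc]
          refine List.Nodup.append hnd2'.2 hg3 ?_
          intro a ha hb
          exact (hg2 a hb).2 (hsub2 a (by
            rcases List.mem_append.mp ha with ha | ha
            · exact Or.inl ha
            · exact Or.inr ha))
    cases cur with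
    | nil =>
      cases next with
      | nil => simp [pvBfsA, pvBfsL, PySem.Dict.getD_of_get?_eq_none _ _ h]
      | cons n ns =>
        have hB : pvBfsL connectivity (f + 1) [] (n :: ns) seen d dist
            = pvBfsL connectivity f ns ([] ++ (pvGrow connectivity n seen).2)
                (pvGrow connectivity n seen).1 (d + 1) (dist.insert n (d + 1)) := by
          simp only [pvBfsL, pvConn_eq]; rfl
        rw [hB]
        have := hstep n ns [] (d + 1) dist h
          (hsub n (Or.inr (List.mem_cons_self ..)))
          (fun x hx => hsub x (Or.inr (by
            rcases hx with hx | hx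
            · exact List.mem_cons_of_mem _ hx
            · simp at hx)))
          (by simpa using hnd)
        simpa using this
    | cons room cur' =>
      have hB : pvBfsL connectivity (f + 1) (room :: cur') next seen d dist
          = pvBfsL connectivity f cur' (next ++ (pvGrow connectivity room seen).2)
              (pvGrow connectivity room seen).1 d (dist.insert room d) := by
        simp only [pvBfsL, pvConn_eq]
        rw [pvGrow_shift]
        rfl
      rw [hB]
      have := hstep room cur' next d dist h
        (hsub room (Or.inl (List.mem_cons_self ..)))
        (fun x hx => hsub x (by
          rcases hx with hx | hx
          · exact Or.inl (List.mem_cons_of_mem _ hx)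
          · exact Or.inr hx))
        (by simpa using hnd)
      simpa using this

lemma pvRoomDistance_eq_map (connectivity : List (String × List String)) (start goal : String) :
    pvRoomDistance connectivity start goal = (pvDistMap connectivity start).getD goal 0 := by
  unfold pvRoomDistance pvDistMap
  have := pvBfsAL connectivity goal (pvFuel connectivity) [start] []
    (PySem.Set.ofList [start]) 0 PySem.Dict.empty
    (PySem.Dict.get?_empty _)
    (by intro x hx; rcases hx with hx | hx
        · simp only [PySem.Set.mem_ofList]; simpa using hx
        · simp at hx)
    (by simp)
  simpa [pvFuelB, pvFuel] using this

-- every distance B ever records is nonnegative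
lemma pvBfsL_nonneg (connectivity : List (String × List String)) :
    ∀ (fuel : Nat) (cur next : List String) (seen : PySem.Set String) (d : Int)
      (dist : PySem.Dict String Int),
      0 ≤ d → (∀ k v, dist.get? k = some v → 0 ≤ v) →
      ∀ k v, (pvBfsL connectivity fuel cur next seen d dist).get? k = some v → 0 ≤ v := by
  intro fuel
  induction fuel with
  | zero =>
    intro cur next seen d dist _ hv k v h
    cases cur <;> cases next <;> exact hv k v (by simpa [pvBfsL] using h)
  | succ f ih =>
    intro cur next seen d dist hd hv k v
    have hins : ∀ (dist0 : PySem.Dict String Int) (room : String) (d2 : Int), 0 ≤ d2 →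
        (∀ k v, dist0.get? k = some v → 0 ≤ v) →
        (∀ k v, (dist0.insert room d2).get? k = some v → 0 ≤ v) := by
      intro dist0 room d2 hd2 hv0 k v hkv
      by_cases hk : k = room
      · subst hk
        rw [PySem.Dict.get?_insert_self] at hkv
        cases hkv; exact hd2
      · rw [PySem.Dict.get?_insert_of_ne _ _ hk] at hkv
        exact hv0 k v hkv
    cases cur with
    | nil =>
      cases next with
      | nil => intro h; exact hv k v (by simpa [pvBfsL] using h)
      | cons n ns =>
        simp only [pvBfsL]
        exact ih _ _ _ _ _ (by omega) (hins dist n (d + 1) (by omega) hv) k v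
    | cons room cur' =>
      simp only [pvBfsL]
      exact ih _ _ _ _ _ hd (hins dist room d hd hv) k v

lemma pvDistMap_getD_nonneg (connectivity : List (String × List String)) (l r : String) :
    0 ≤ (pvDistMap connectivity l).getD r 0 := by
  cases h : (pvDistMap connectivity l).get? r with
  | none => rw [PySem.Dict.getD_of_get?_eq_none _ _ h]
  | some v =>
    rw [PySem.Dict.getD_of_get?_eq_some _ _ h]
    exact pvBfsL_nonneg connectivity _ _ _ _ _ _ le_rfl
      (fun k v h => by simp [PySem.Dict.get?_empty] at h) r v h

-- the dict comprehension of distance maps: lookup of a listed room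
lemma pvMaps_get? (connectivity : List (String × List String)) (l : String) :
    ∀ (rooms : List String) (m : PySem.Dict String (PySem.Dict String Int)),
      (rooms.foldl (fun m room => m.insert room (pvDistMap connectivity room)) m).get? l
        = if l ∈ rooms then some (pvDistMap connectivity l) else m.get? l := by
  intro rooms
  induction rooms with
  | nil => intro m; simp
  | cons r rs ih =>
    intro m
    simp only [List.foldl_cons]
    rw [ih]
    by_cases hl : l ∈ rs
    · simp [hl]
    · by_cases hlr : l = r
      · subst hlr
        simp [hl, PySem.Dict.get?_insert_self]
      · simp [hl, hlr, PySem.Dict.get?_insert_of_ne _ _ hlr]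

-- the key B scans by is nonnegative on every pair
lemma pvKey_nonneg (connectivity : List (String × List String))
    (maps : PySem.Dict String (PySem.Dict String Int))
    (hmaps : ∀ k dm, maps.get? k = some dm → ∃ s, dm = pvDistMap connectivity s)
    (p : String × String) : 0 ≤ (maps.getD p.1 PySem.Dict.empty).getD p.2 0 := by
  cases h : maps.get? p.1 with
  | none =>
    rw [PySem.Dict.getD_of_get?_eq_none _ _ h,
        PySem.Dict.getD_of_get?_eq_none _ _ (PySem.Dict.get?_empty _)]
  | some dm =>
    rw [PySem.Dict.getD_of_get?_eq_some _ _ h]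
    obtain ⟨s, hs⟩ := hmaps p.1 dm h
    subst hs
    exact pvDistMap_getD_nonneg connectivity s p.2

-- skipping inside a fold is folding over the complementary filter
lemma pvFoldlSkip {α β : Type} (g : β → α → β) (b : α → Bool) (l : List α) (init : β) :
    l.foldl (fun st x => if b x then st else g st x) init
      = (l.filter (fun x => !b x)).foldl g init := by
  rw [List.foldl_filter]
  apply PySem.List.foldl_congr_mem
  intro acc x _
  cases b x <;> simp


-- the best-so-far fold started on a (value, key) state is Python's first-max fold
lemma pvMaxRun (k : String × String → Int)
    (step : Option (String × String) → (String × String) → Option (String × String))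
    (hstep : ∀ m p, step (some m) p = if k m < k p then some p else some m) :
    ∀ (tl : List (String × String)) (b : String × String),
      tl.foldl step (some b)
      = some ((tl.foldl (fun (st : (String × String) × Int) p =>
          if k p > st.2 then (p, k p) else st) (b, k b)).1) := by
  intro tl
  induction tl with
  | nil => intro b; rfl
  | cons p tl ih =>
    intro b
    simp only [List.foldl_cons, hstep]
    by_cases h : k b < k p
    · simpa [h] using ih p
    · simpa [h] using ih b

-- the whole selection: best-so-far fold from ((r0,rl),-1) is Python's max with default
lemma pvMaxFold (k : String × String → Int) (ps : List (String × String))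
    (b0 : String × String) (hnn : ∀ p ∈ ps, 0 ≤ k p) :
    (ps.foldl (fun (st : (String × String) × Int) p =>
        if k p > st.2 then (p, k p) else st) (b0, -1)).1
      = (PySem.List.max? ps k).getD b0 := by
  cases ps with
  | nil => rfl
  | cons p0 tl =>
    have h1 : List.foldl (fun (st : (String × String) × Int) p =>
          if k p > st.2 then (p, k p) else st)
          ((fun (st : (String × String) × Int) p =>
            if k p > st.2 then (p, k p) else st) (b0, -1) p0) tl
        = List.foldl (fun (st : (String × String) × Int) p =>
          if k p > st.2 then (p, k p) else st) (p0, k p0) tl := by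
      congr 1
      show (if k p0 > (-1 : Int) then (p0, k p0) else (b0, -1)) = (p0, k p0)
      rw [if_pos]
      have := hnn p0 (List.mem_cons_self ..)
      omega
    have hmax : PySem.List.max? (p0 :: tl) k
        = some ((tl.foldl (fun (st : (String × String) × Int) p =>
            if k p > st.2 then (p, k p) else st) (p0, k p0)).1) := by
      show List.foldl _ none (p0 :: tl) = _
      rw [List.foldl_cons]
      show List.foldl _ (some p0) tl = _
      exact pvMaxRun k _ (fun m p => rfl) tl p0
    rw [List.foldl_cons, h1, hmax]
    rfl

-- ===== VERDICT (by name: the statement is the Claim_ definition above) =====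
theorem farthest_rooms_py_spec : Claim_equal_farthest_rooms_py := by
  intro rooms connectivity _ _
  unfold Spec_farthest_rooms_py
  cases h0 : PySem.List.pyGet? rooms 0 with
  | none =>
    cases h1 : PySem.List.pyGet? rooms (-1) <;>
      simp [farthest_rooms_py, farthest_rooms_py_alt, h0, h1]
  | some r0 =>
    cases h1 : PySem.List.pyGet? rooms (-1) with
    | none => simp [farthest_rooms_py, farthest_rooms_py_alt, h0, h1]
    | some rl =>
      simp only [farthest_rooms_py, farthest_rooms_py_alt, h0, h1]
      -- notation
      set maps := rooms.foldl (fun m room => m.insert room (pvDistMap connectivity room))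
        (PySem.Dict.empty : PySem.Dict String (PySem.Dict String Int)) with hmapsdef
      set key : String × String → Int := fun p => (maps.getD p.1 PySem.Dict.empty).getD p.2 0
        with hkeydef
      set pairs := rooms.flatMap
        (fun l => (rooms.filter (fun r => !(l == r))).map (fun r => (l, r))) with hpairsdef
      -- step 1-2: A's nested skip-folds = fold of the pair step over `pairs`
      have hA : (rooms.foldl (fun st left =>
          rooms.foldl (fun (st : (String × String) × Int) right =>
              if left == right then st
              else
                let d := pvRoomDistance connectivity left right
                if d > st.2 then ((left, right), d) else st)
            st)
          ((r0, rl), -1))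
          = pairs.foldl (fun (st : (String × String) × Int) p =>
              if pvRoomDistance connectivity p.1 p.2 > st.2
              then (p, pvRoomDistance connectivity p.1 p.2) else st) ((r0, rl), -1) := by
        rw [hpairsdef, List.foldl_flatMap]
        apply PySem.List.foldl_congr_mem
        intro acc left _
        rw [pvFoldlSkip (fun st right =>
            let d := pvRoomDistance connectivity left right
            if d > st.2 then ((left, right), d) else st) (fun r => left == r) rooms acc]
        rw [List.foldl_map]
      -- step 3: on members of `pairs`, A's key is B's key
      have hkeys : ∀ p ∈ pairs, pvRoomDistance connectivity p.1 p.2 = key p := by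
        intro p hp
        have hp1 : p.1 ∈ rooms := by
          rw [hpairsdef] at hp
          simp only [List.mem_flatMap, List.mem_map, List.mem_filter] at hp
          obtain ⟨l, hl, r, _, hpr⟩ := hp
          rw [← hpr]
          exact hl
        rw [pvRoomDistance_eq_map]
        have hm : maps.get? p.1 = some (pvDistMap connectivity p.1) := by
          rw [hmapsdef]
          have := pvMaps_get? connectivity p.1 rooms PySem.Dict.empty
          rw [if_pos hp1] at this
          exact this
        simp only [hkeydef]
        rw [PySem.Dict.getD_of_get?_eq_some _ _ hm]
      have hAk : (rooms.foldl (fun st left =>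
          rooms.foldl (fun (st : (String × String) × Int) right =>
              if left == right then st
              else
                let d := pvRoomDistance connectivity left right
                if d > st.2 then ((left, right), d) else st)
            st)
          ((r0, rl), -1))
          = pairs.foldl (fun (st : (String × String) × Int) p =>
              if key p > st.2 then (p, key p) else st) ((r0, rl), -1) := by
        rw [hA]
        apply PySem.List.foldl_congr_mem
        intro acc p hp
        rw [hkeys p hp]
      rw [hAk]
      -- the maps dict only holds distance maps
      have hmapsval : ∀ k dm, maps.get? k = some dm → ∃ s, dm = pvDistMap connectivity s := by
        intro k dm hk
        rw [hmapsdef, pvMaps_get? connectivity k rooms PySem.Dict.empty] at hk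
        by_cases hkr : k ∈ rooms
        · rw [if_pos hkr] at hk
          exact ⟨k, by cases hk; rfl⟩
        · rw [if_neg hkr, PySem.Dict.get?_empty] at hk
          cases hk
      -- step 4: first-max over pairs
      have := pvMaxFold key pairs (r0, rl)
        (fun p _ => pvKey_nonneg connectivity maps hmapsval p)
      rw [this]
      cases PySem.List.max? pairs key <;> rfl
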